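-- pv_equiv track=rewrite | github.com/bhavsoni/CS115b---Intro-To-Computer-Science | hw9.py | catenateLoop
-- ===== SOURCE A (Python) =====
-- def catenateLoop(str_list):
--     '''Same as catenate'''
--     string = ''
--     '''originally set value of string to '' '''
--     for x in str_list:
--         string = string + x
--         '''x is used as a way to keep adding strigns together for however many strings in the list.
--         the string now equals the original string plus one string from the list for however strings there are'''
--     return string
--     '''function returns the final catenate of the strings'''
-- ===== SOURCE B (Python) =====
-- def catenateLoop(str_list):
--     return ''.join(str_list)
-- ===== Notes on version B (the rewrite author's own statement) =====
-- stated objective: idiomatic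
-- what changed: Replaces the accumulating for-loop with a single ''.join(str_list) call.
import Mathlib
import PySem

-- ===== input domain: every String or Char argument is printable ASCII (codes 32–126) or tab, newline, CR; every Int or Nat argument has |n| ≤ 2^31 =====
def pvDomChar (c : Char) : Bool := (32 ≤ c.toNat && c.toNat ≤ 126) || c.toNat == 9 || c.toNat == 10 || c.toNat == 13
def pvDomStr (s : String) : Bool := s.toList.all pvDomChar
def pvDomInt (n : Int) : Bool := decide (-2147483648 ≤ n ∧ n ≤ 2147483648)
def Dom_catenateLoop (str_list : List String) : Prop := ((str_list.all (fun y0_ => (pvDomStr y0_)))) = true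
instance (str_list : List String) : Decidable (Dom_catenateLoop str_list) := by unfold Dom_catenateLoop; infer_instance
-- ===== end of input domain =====

-- B replaces the accumulating loop by a single ''.join(str_list) call (idiomatic one-pass concatenation).

-- ===== PORT A =====
def catenateLoop (str_list : List String) : String :=
  str_list.foldl (fun string x => string ++ x) ""

-- ===== PORT B =====
def catenateLoop_alt (str_list : List String) : String :=
  PySem.Str.join "" str_list

-- ===== PRECONDITION & SPEC =====
def Spec_catenateLoop (str_list : List String) (out : String) : Prop := out = catenateLoop_alt str_list
instance (str_list : List String) (out : String) : Decidable (Spec_catenateLoop str_list out) := by unfold Spec_catenateLoop; infer_instance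

-- ===== CLAIM (what is proved, stated in full; the proofs are below) =====
def Claim_equal_catenateLoop : Prop := ∀ (str_list : List String), Dom_catenateLoop str_list → Spec_catenateLoop str_list (catenateLoop str_list)

-- ===== LEMMAS AND PROOFS =====
lemma intercalate_nil_eq_flatten (xs : List (List Char)) :
    ([] : List Char).intercalate xs = xs.flatten := by
  induction xs with
  | nil => simp [List.intercalate]
  | cons y ys ih =>
      cases ys with
      | nil => simp [List.intercalate]
      | cons z zs =>
          simp only [List.intercalate, List.intersperse] at *
          simp_all

lemma toList_foldl_append (l : List String) (s : String) :
    (l.foldl (fun string x => string ++ x) s).toList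
      = s.toList ++ (l.map String.toList).flatten := by
  induction l generalizing s with
  | nil => simp
  | cons x rest ih => simp [List.foldl, ih, String.toList_append]

-- ===== VERDICT (by name: the statement is the Claim_ definition above) =====
theorem catenateLoop_spec : Claim_equal_catenateLoop := by
  intro l _
  unfold Spec_catenateLoop catenateLoop catenateLoop_alt
  apply String.toList_injective
  simp [toList_foldl_append, PySem.Str.join, PySem.Chars.join, intercalate_nil_eq_flatten]
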